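-- pv_equiv track=rewrite | github.com/nithinrdy/fettle-scraper | bashable_scripts/scraper_script.py | clean_parentheses
-- ===== SOURCE A (Python) =====
-- def clean_parentheses(x):
--     if '(' not in x:
--         return x
--     else:
--         cleaned_up = ''
--         opening_split = x.split('(')
--         for item in opening_split:
--             closing_split = item.split(')')
--             for phrase in closing_split:
--                 if len(phrase) > len(cleaned_up):
--                     cleaned_up = phrase
--         return cleaned_up
-- ===== SOURCE B (Python) =====
-- def clean_parentheses(x):
--     if '(' not in x:
--         return x
--     best = ''
--     cur = ''
--     for ch in x:
--         if ch == '(' or ch == ')':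
--             if len(cur) > len(best):
--                 best = cur
--             cur = ''
--         else:
--             cur += ch
--     if len(cur) > len(best):
--         best = cur
--     return best
-- ===== Notes on version B (the rewrite author's own statement) =====
-- stated objective: alternative
-- what changed: Replaces the nested split('(')/split(')') passes that materialise segment lists with a single left-to-right character scan keeping only the current run and the best run so far.
import Mathlib
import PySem

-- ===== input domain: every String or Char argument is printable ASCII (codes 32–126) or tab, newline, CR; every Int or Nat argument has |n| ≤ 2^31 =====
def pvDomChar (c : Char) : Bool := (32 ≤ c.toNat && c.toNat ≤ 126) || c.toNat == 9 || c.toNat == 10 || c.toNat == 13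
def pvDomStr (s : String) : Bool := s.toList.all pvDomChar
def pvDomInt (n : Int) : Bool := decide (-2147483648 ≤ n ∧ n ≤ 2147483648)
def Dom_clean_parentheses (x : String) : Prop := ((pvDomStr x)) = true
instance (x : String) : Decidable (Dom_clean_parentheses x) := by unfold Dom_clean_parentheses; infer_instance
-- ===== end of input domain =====

-- B replaces A's nested split('(')/split(')') passes by a single character scan keeping
-- only the current run and the best run so far (objective: alternative decomposition).

-- ===== PORT A =====
-- literal port of A: guard, split on '(', inner split on ')', keep first longest phrase
def clean_parentheses (x : String) : String :=
  if PySem.Str.isIn "(" x = false then x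
  else
    String.ofList ((PySem.Chars.splitOn x.toList ['(']).foldl (fun cleaned_up item =>
      (PySem.Chars.splitOn item [')']).foldl (fun cleaned_up phrase =>
        if phrase.length > cleaned_up.length then phrase else cleaned_up) cleaned_up)
      ([] : List Char))

-- ===== PORT B =====
-- Source B's loop over the characters: state = (best, cur)
def cpScan (best cur : List Char) : List Char → List Char
  | [] => if cur.length > best.length then cur else best
  | c :: t =>
    if c = '(' ∨ c = ')' then
      cpScan (if cur.length > best.length then cur else best) [] t
    else
      cpScan best (cur ++ [c]) t

def clean_parentheses_alt (x : String) : String :=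
  if PySem.Str.isIn "(" x = false then x
  else String.ofList (cpScan [] [] x.toList)

-- ===== PRECONDITION & SPEC =====
def Spec_clean_parentheses (x : String) (out : String) : Prop := out = clean_parentheses_alt x
instance (x : String) (out : String) : Decidable (Spec_clean_parentheses x out) := by unfold Spec_clean_parentheses; infer_instance

-- ===== CLAIM (what is proved, stated in full; the proofs are below) =====
def Claim_equal_clean_parentheses : Prop := ∀ (x : String), Dom_clean_parentheses x → Spec_clean_parentheses x (clean_parentheses x)

-- ===== LEMMAS AND PROOFS =====

-- segments of l split at occurrences of d, with cur prefixed to the first segment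
def segs (d : Char) (cur : List Char) : List Char → List (List Char)
  | [] => [cur]
  | c :: t => if c = d then cur :: segs d [] t else segs d (cur ++ [c]) t

-- segments of l split at '(' and ')', with cur prefixed to the first segment
def segsBoth (cur : List Char) : List Char → List (List Char)
  | [] => [cur]
  | c :: t => if c = '(' ∨ c = ')' then cur :: segsBoth [] t else segsBoth (cur ++ [c]) t

def pick (best s : List Char) : List Char := if s.length > best.length then s else best

theorem segs_cons_delim (d : Char) (cur t : List Char) :
    segs d cur (d :: t) = cur :: segs d [] t := by
  simp [segs]

theorem segs_cons_other (d c : Char) (hc : c ≠ d) (cur t : List Char) :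
    segs d cur (c :: t) = segs d (cur ++ [c]) t := by
  simp [segs, hc]

theorem segsBoth_cons_delim (c : Char) (h : c = '(' ∨ c = ')') (cur t : List Char) :
    segsBoth cur (c :: t) = cur :: segsBoth [] t := by
  rw [segsBoth, if_pos h]

theorem segsBoth_cons_other (c : Char) (h1 : c ≠ '(') (h2 : c ≠ ')') (cur t : List Char) :
    segsBoth cur (c :: t) = segsBoth (cur ++ [c]) t := by
  rw [segsBoth, if_neg (not_or.mpr ⟨h1, h2⟩)]

theorem segs_ne_nil (d : Char) (cur : List Char) (l : List Char) : segs d cur l ≠ [] := by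
  induction l generalizing cur with
  | nil => simp [segs]
  | cons c t ih =>
    simp only [segs]
    split <;> simp [ih]

theorem dropLast_getLastD (l : List (List Char)) (h : l ≠ []) :
    l.dropLast ++ [l.getLastD []] = l := by
  rcases l.eq_nil_or_concat with rfl | ⟨L, b, rfl⟩
  · exact absurd rfl h
  · simp

theorem go_eq (d : Char) : ∀ (l : List Char) (fuel : Nat) (cur : List Char) (acc : List (List Char)),
    l.length < fuel →
    PySem.Chars.splitOn.go [d] fuel l cur acc = acc.reverse ++ segs d cur.reverse l := by
  intro l
  induction l with
  | nil =>
    intro fuel cur acc h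
    match fuel with
    | fuel + 1 => simp [PySem.Chars.splitOn.go, segs]
  | cons c t ih =>
    intro fuel cur acc h
    match fuel with
    | fuel + 1 =>
      rw [PySem.Chars.splitOn.go]
      by_cases hc : c = d
      · subst hc
        simp only [List.isPrefixOf, beq_self_eq_true, Bool.true_and, if_pos,
          List.length_cons, List.length_nil, List.drop_succ_cons, List.drop_zero]
        rw [ih fuel [] (cur.reverse :: acc) (by simpa using h)]
        simp [segs]
      · have hpf : [d].isPrefixOf (c :: t) = false := by
          simp only [List.isPrefixOf, Bool.and_true, beq_eq_false_iff_ne, ne_eq]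
          exact fun hdc => hc hdc.symm
        rw [hpf]
        simp only [Bool.false_eq_true, if_false]
        rw [ih fuel (c :: cur) acc (by simpa using h)]
        simp [segs, hc]

theorem splitOn_eq_segs (d : Char) (l : List Char) :
    PySem.Chars.splitOn l [d] = segs d [] l := by
  rw [PySem.Chars.splitOn, go_eq d l (l.length + 1) [] [] (by omega)]
  simp

-- appending one delimiter to the input appends one empty segment
theorem segs_append_delim (d : Char) (l cur : List Char) :
    segs d cur (l ++ [d]) = segs d cur l ++ [[]] := by
  induction l generalizing cur with
  | nil => simp [segs]
  | cons c t ih =>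
    by_cases hc : c = d
    · subst hc
      rw [List.cons_append, segs_cons_delim, segs_cons_delim, ih, List.cons_append]
    · rw [List.cons_append, segs_cons_other d c hc, segs_cons_other d c hc, ih]

-- appending one non-delimiter extends the last segment
theorem segs_append_other (d c : Char) (hc : c ≠ d) (l cur : List Char) :
    segs d cur (l ++ [c]) =
      (segs d cur l).dropLast ++ [(segs d cur l).getLastD [] ++ [c]] := by
  induction l generalizing cur with
  | nil => simp [segs, hc]
  | cons c' t ih =>
    by_cases hc' : c' = d
    · subst hc'
      rw [List.cons_append, segs_cons_delim, segs_cons_delim, ih]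
      have hne := segs_ne_nil c' ([] : List Char) t
      rw [List.dropLast_cons_of_ne_nil hne]
      have hlast : (cur :: segs c' [] t).getLastD [] = (segs c' [] t).getLastD [] := by
        cases h : segs c' [] t with
        | nil => exact absurd h hne
        | cons a l' => simp [List.getLastD]
      rw [hlast, List.cons_append]
    · rw [List.cons_append, segs_cons_other d c' hc', segs_cons_other d c' hc', ih]

-- the two nested splits, flattened, are the two-delimiter segmentation
theorem flatMap_segs (cs cur : List Char) :
    (segs '(' cur cs).flatMap (fun it => segs ')' [] it) =
      (segs ')' [] cur).dropLast ++ segsBoth ((segs ')' [] cur).getLastD []) cs := by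
  induction cs generalizing cur with
  | nil =>
    simp only [segs, List.flatMap_cons, List.flatMap_nil, List.append_nil, segsBoth]
    exact (dropLast_getLastD _ (segs_ne_nil ')' [] cur)).symm
  | cons c t ih =>
    by_cases h1 : c = '('
    · subst h1
      rw [segs_cons_delim, segsBoth_cons_delim _ (Or.inl rfl), List.flatMap_cons, ih]
      have h0 : segs ')' [] ([] : List Char) = [[]] := by simp [segs]
      rw [h0]
      have hd : ([[]] : List (List Char)).dropLast = [] := rfl
      have hl : ([[]] : List (List Char)).getLastD [] = [] := rfl
      rw [hd, hl, List.nil_append]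
      conv_rhs => rw [List.append_cons]
      rw [dropLast_getLastD _ (segs_ne_nil ')' [] cur)]
    · by_cases h2 : c = ')'
      · subst h2
        rw [segs_cons_other '(' ')' h1, segsBoth_cons_delim _ (Or.inr rfl), ih,
          segs_append_delim, List.dropLast_concat, List.getLastD_concat]
        conv_rhs => rw [List.append_cons]
        rw [dropLast_getLastD _ (segs_ne_nil ')' [] cur)]
      · rw [segs_cons_other '(' c h1, segsBoth_cons_other c h1 h2, ih,
          segs_append_other ')' c h2, List.dropLast_concat, List.getLastD_concat]

-- B's scan folds pick over the two-delimiter segmentation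
theorem cpScan_eq_foldl (cs best cur : List Char) :
    cpScan best cur cs = (segsBoth cur cs).foldl pick best := by
  induction cs generalizing best cur with
  | nil => simp [cpScan, segsBoth, pick]
  | cons c t ih =>
    by_cases h : c = '(' ∨ c = ')'
    · rw [cpScan, if_pos h, segsBoth_cons_delim c h, List.foldl_cons, ih]
      rfl
    · rcases not_or.mp h with ⟨h1, h2⟩
      rw [cpScan, if_neg h, segsBoth_cons_other c h1 h2, ih]

-- A's nested foldl is a foldl of pick over the flattened segments
theorem nested_foldl (L : List (List Char)) (b : List Char) :
    L.foldl (fun cleaned_up item =>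
      (PySem.Chars.splitOn item [')']).foldl (fun cleaned_up phrase =>
        if phrase.length > cleaned_up.length then phrase else cleaned_up) cleaned_up) b
    = (L.flatMap (fun it => segs ')' [] it)).foldl pick b := by
  induction L generalizing b with
  | nil => rfl
  | cons a l ihL =>
    rw [List.foldl_cons, List.flatMap_cons, List.foldl_append, ihL, splitOn_eq_segs]
    rfl

-- ===== VERDICT (by name: the statement is the Claim_ definition above) =====
theorem clean_parentheses_spec : Claim_equal_clean_parentheses := by
  intro x _
  unfold Spec_clean_parentheses
  rw [clean_parentheses, clean_parentheses_alt]
  by_cases hg : PySem.Str.isIn "(" x = false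
  · rw [if_pos hg, if_pos hg]
  · rw [if_neg hg, if_neg hg]
    congr 1
    rw [cpScan_eq_foldl, splitOn_eq_segs, nested_foldl, flatMap_segs]
    have h0 : segs ')' [] ([] : List Char) = [[]] := by simp [segs]
    rw [h0]
    have hd : ([[]] : List (List Char)).dropLast = [] := rfl
    have hl : ([[]] : List (List Char)).getLastD [] = [] := rfl
    rw [hd, hl, List.nil_append]
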